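-- pv_equiv track=rewrite | github.com/Rzhek/ProblemSolutions | learnset/test.py | solve
-- ===== SOURCE A (Python) =====
-- from bisect import bisect_left, bisect_right
--
-- def solve(profit, cost):
--     n = len(profit)
--     diff = [profit[i] - cost[i] for i in range(n)]
--
--     diff.sort()
--
--     res = 0
--     for l in range(n):
--         if (diff[l] == 0):
--             r = bisect_left(diff, 1)
--             res += n - r
--         elif (diff[l] < 0):
--             r = bisect_left(diff, -diff[l] + 1)
--             res += n - r
--         else:
--             res += n - l - 1
--
--     return res
-- ===== SOURCE B (Python) =====
-- def solve(profit, cost):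
--     n = len(profit)
--     diff = [profit[i] - cost[i] for i in range(n)]
--     diff.sort()
--     res = 0
--     i, j = 0, n - 1
--     while i < j:
--         if diff[i] + diff[j] > 0:
--             res += j - i
--             j -= 1
--         else:
--             i += 1
--     return res
-- ===== Notes on version B (the rewrite author's own statement) =====
-- stated objective: alternative
-- what changed: A counts, for every element of the sorted diff array, its matching partners with a bisect_left binary search; B instead counts all pairs with a single converging two-pointer sweep over the same sorted diff array.
import Mathlib
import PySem

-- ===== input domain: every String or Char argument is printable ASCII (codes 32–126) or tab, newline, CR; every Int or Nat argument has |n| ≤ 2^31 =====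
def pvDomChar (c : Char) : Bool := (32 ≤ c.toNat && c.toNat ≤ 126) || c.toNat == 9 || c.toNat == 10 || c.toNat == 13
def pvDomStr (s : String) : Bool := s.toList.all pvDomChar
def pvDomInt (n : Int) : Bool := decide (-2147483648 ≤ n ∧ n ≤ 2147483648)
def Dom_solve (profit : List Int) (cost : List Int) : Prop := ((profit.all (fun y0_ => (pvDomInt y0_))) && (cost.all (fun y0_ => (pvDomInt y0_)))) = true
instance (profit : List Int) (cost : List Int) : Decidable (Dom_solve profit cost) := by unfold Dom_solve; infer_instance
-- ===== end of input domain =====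

-- B replaces A's per-element bisect_left counting over the sorted diff array with a single
-- converging two-pointer sweep over the same sorted array (alternative counting pass, same result).
-- (A sorts `diff` in place in Python; `diff` is a local list, so no caller-visible mutation.)


-- ===== PORT A =====
-- diff = [profit[i] - cost[i] for i in range(n)]; indices are nonnegative and (under Pre_) in
-- range for both lists, so pyGetD with default 0 is exact there.
def pvDiff (profit : List Int) (cost : List Int) : List Int :=
  (List.range profit.length).map
    (fun i => PySem.List.pyGetD profit (i : Int) 0 - PySem.List.pyGetD cost (i : Int) 0)

def solve (profit : List Int) (cost : List Int) : Int :=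
  let n := profit.length
  let d := PySem.List.sorted (pvDiff profit cost) (fun x => x)  -- diff.sort()
  (List.range n).foldl
    (fun res (l : Nat) =>
      let dl := PySem.List.pyGetD d (l : Int) 0
      if dl = 0 then res + ((n : Int) - (PySem.List.bisectLeft d 1 : Int))
      else if dl < 0 then res + ((n : Int) - (PySem.List.bisectLeft d (-dl + 1) : Int))
      else res + ((n : Int) - (l : Int) - 1))
    0

-- ===== PORT B =====
-- while i < j: …  — i, j stay in [0, n) throughout, so Nat indices with pyGetD are exact.
def twoPtrLoop (d : List Int) (i j : Nat) (res : Int) : Int :=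
  if i < j then
    if 0 < PySem.List.pyGetD d (i : Int) 0 + PySem.List.pyGetD d (j : Int) 0 then
      twoPtrLoop d i (j - 1) (res + ((j : Int) - (i : Int)))
    else
      twoPtrLoop d (i + 1) j res
  else res
termination_by j - i

def solve_alt (profit : List Int) (cost : List Int) : Int :=
  let n := profit.length
  let d := PySem.List.sorted (pvDiff profit cost) (fun x => x)  -- diff.sort()
  twoPtrLoop d 0 (n - 1) 0

-- ===== PRECONDITION & SPEC =====
-- Pre_ excludes exactly the inputs where Python raises IndexError (cost shorter than profit:
-- cost[i] with i ≥ len(cost)); both A and B raise there.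
def Pre_solve (profit : List Int) (cost : List Int) : Prop := profit.length ≤ cost.length
instance (profit : List Int) (cost : List Int) : Decidable (Pre_solve profit cost) := by unfold Pre_solve; infer_instance

def pvWitness_solve : List Int × List Int := ([3, -1, 2, 0], [1, 2, 0, 0])

def Spec_solve (profit : List Int) (cost : List Int) (out : Int) : Prop := out = solve_alt profit cost
instance (profit : List Int) (cost : List Int) (out : Int) : Decidable (Spec_solve profit cost out) := by unfold Spec_solve; infer_instance

-- ===== CLAIM (what is proved, stated in full; the proofs are below) =====
def Claim_equal_solve : Prop := ∀ (profit : List Int) (cost : List Int), Dom_solve profit cost → Pre_solve profit cost → Spec_solve profit cost (solve profit cost)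

-- ===== LEMMAS AND PROOFS =====

-- Number of partners b of row l with b ≤ j (pairs (l, b), l < b, d[l] + d[b] > 0).
def rowCnt (d : List Int) (l j : Nat) : Nat :=
  ((Finset.range d.length).filter (fun b => l < b ∧ b ≤ j ∧ 0 < d.getD l 0 + d.getD b 0)).card

-- Pairs (a, b) with i ≤ a < b ≤ j and d[a] + d[b] > 0.
def pc (d : List Int) (i j : Nat) : Nat :=
  ∑ l ∈ Finset.Ico i d.length, rowCnt d l j

theorem sorted_getD_le {d : List Int} (hs : d.Pairwise (· ≤ ·)) {a b : Nat}
    (hab : a ≤ b) (hb : b < d.length) : d.getD a 0 ≤ d.getD b 0 := by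
  rcases Nat.lt_or_ge a b with h | h
  · have := (List.pairwise_iff_getElem.mp hs) a b (by omega) hb h
    simpa [List.getD_eq_getElem, Nat.lt_of_lt_of_le (by omega : a < b) (Nat.le_of_lt hb), hb,
      List.getD_eq_getElem?_getD, List.getElem?_eq_getElem, (by omega : a < d.length)] using this
  · have : a = b := by omega
    simp [this]

theorem rowCnt_high {d : List Int} {l j : Nat} (h : j ≤ l) : rowCnt d l j = 0 := by
  unfold rowCnt
  rw [Finset.card_eq_zero, Finset.filter_eq_empty_iff]
  intro b _
  simp only [not_and]
  intro h1 h2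
  omega

theorem pc_zero {d : List Int} {i j : Nat} (h : j ≤ i) : pc d i j = 0 := by
  unfold pc
  refine Finset.sum_eq_zero (fun l hl => ?_)
  exact rowCnt_high (by have := (Finset.mem_Ico.mp hl).1; omega)

theorem rowCnt_succ {d : List Int} {l j : Nat}
    (hl : l < j) (hj : j < d.length) (hpos : 0 < d.getD l 0 + d.getD j 0) :
    rowCnt d l j = rowCnt d l (j - 1) + 1 := by
  unfold rowCnt
  have hset : (Finset.range d.length).filter (fun b => l < b ∧ b ≤ j ∧ 0 < d.getD l 0 + d.getD b 0)
      = insert j ((Finset.range d.length).filter (fun b => l < b ∧ b ≤ j - 1 ∧ 0 < d.getD l 0 + d.getD b 0)) := by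
    ext b
    simp only [Finset.mem_insert, Finset.mem_filter, Finset.mem_range]
    constructor
    · rintro ⟨hb, h1, h2, h3⟩
      rcases Nat.eq_or_lt_of_le h2 with rfl | h
      · exact Or.inl rfl
      · exact Or.inr ⟨hb, h1, by omega, h3⟩
    · rintro (rfl | ⟨hb, h1, h2, h3⟩)
      · exact ⟨hj, hl, le_refl _, hpos⟩
      · exact ⟨hb, h1, by omega, h3⟩
  rw [hset, Finset.card_insert_of_notMem (by simp only [Finset.mem_filter]; rintro ⟨-, -, h2, -⟩; omega)]

theorem rowCnt_bot_zero {d : List Int} (hs : d.Pairwise (· ≤ ·)) {i j : Nat}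
    (_hij : i < j) (hj : j < d.length) (hneg : d.getD i 0 + d.getD j 0 ≤ 0) :
    rowCnt d i j = 0 := by
  unfold rowCnt
  rw [Finset.card_eq_zero, Finset.filter_eq_empty_iff]
  intro b hb
  simp only [Finset.mem_range] at hb
  simp only [not_and]
  intro h1 h2
  have := sorted_getD_le hs h2 hj
  omega

theorem pc_step_pos {d : List Int} (hs : d.Pairwise (· ≤ ·)) {i j : Nat}
    (hij : i < j) (hj : j < d.length)
    (hpos : 0 < d.getD i 0 + d.getD j 0) :
    (pc d i j : Int) = (pc d i (j - 1) : Int) + ((j : Int) - (i : Int)) := by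
  unfold pc
  have hsplit : Finset.Ico i d.length = Finset.Ico i j ∪ Finset.Ico j d.length := by
    rw [Finset.Ico_union_Ico_eq_Ico (by omega) (by omega)]
  have hdisj : Disjoint (Finset.Ico i j) (Finset.Ico j d.length) := by
    simp [Finset.disjoint_left, Finset.mem_Ico]
    omega
  rw [hsplit, Finset.sum_union hdisj, Finset.sum_union hdisj]
  have h1 : ∀ l ∈ Finset.Ico i j, rowCnt d l j = rowCnt d l (j - 1) + 1 := by
    intro l hl
    rw [Finset.mem_Ico] at hl
    refine rowCnt_succ hl.2 hj ?_
    have := sorted_getD_le hs (a := i) (b := l) hl.1 (by omega)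
    omega
  have h2 : ∀ l ∈ Finset.Ico j d.length, rowCnt d l j = rowCnt d l (j - 1) := by
    intro l hl
    rw [Finset.mem_Ico] at hl
    rw [rowCnt_high hl.1, rowCnt_high (by omega)]
  rw [Finset.sum_congr rfl h1, Finset.sum_congr rfl h2, Finset.sum_add_distrib]
  simp [Nat.card_Ico]
  push_cast [Nat.cast_sub (le_of_lt hij)]
  ring

theorem pc_step_neg {d : List Int} (hs : d.Pairwise (· ≤ ·)) {i j : Nat}
    (hij : i < j) (hj : j < d.length)
    (hneg : d.getD i 0 + d.getD j 0 ≤ 0) :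
    pc d i j = pc d (i + 1) j := by
  unfold pc
  rw [Finset.sum_eq_sum_Ico_succ_bot (by omega : i < d.length)]
  rw [rowCnt_bot_zero hs hij hj hneg]
  simp

theorem twoPtrLoop_eq_pc {d : List Int} (hs : d.Pairwise (· ≤ ·)) :
    ∀ (i j : Nat) (res : Int), (i < j → j < d.length) →
      twoPtrLoop d i j res = res + (pc d i j : Int) := by
  intro i j res hjn
  induction i, j, res using twoPtrLoop.induct d with
  | case1 i j res hij hpos ih =>
    have hj : j < d.length := hjn hij
    rw [twoPtrLoop, if_pos hij, if_pos hpos, ih (fun h => by omega)]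
    have hpos' : 0 < d.getD i 0 + d.getD j 0 := by
      simpa [PySem.List.pyGetD_natCast] using hpos
    rw [pc_step_pos hs hij hj hpos']
    ring
  | case2 i j res hij hpos ih =>
    have hj : j < d.length := hjn hij
    rw [twoPtrLoop, if_pos hij, if_neg hpos, ih (fun h => hjn (by omega))]
    have hneg : d.getD i 0 + d.getD j 0 ≤ 0 := by
      have := hpos
      simp only [PySem.List.pyGetD_natCast] at this
      omega
    rw [pc_step_neg hs hij hj hneg]
  | case3 i j res hij =>
    rw [twoPtrLoop, if_neg hij, pc_zero (by omega)]
    simp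

-- A's per-row bisect count equals rowCnt (the three branches of A's loop body).
theorem rowCnt_eq_sub {d : List Int} {l lo : Nat}
    (hiff : ∀ b, b < d.length → ((l < b ∧ 0 < d.getD l 0 + d.getD b 0) ↔ lo ≤ b)) :
    rowCnt d l (d.length - 1) = d.length - lo := by
  unfold rowCnt
  have hset : (Finset.range d.length).filter
      (fun b => l < b ∧ b ≤ d.length - 1 ∧ 0 < d.getD l 0 + d.getD b 0) = Finset.Ico lo d.length := by
    ext b
    simp only [Finset.mem_filter, Finset.mem_range, Finset.mem_Ico]
    constructor
    · rintro ⟨hb, h1, _, h3⟩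
      exact ⟨(hiff b hb).mp ⟨h1, h3⟩, hb⟩
    · rintro ⟨h1, hb⟩
      have := (hiff b hb).mpr h1
      exact ⟨hb, this.1, by omega, this.2⟩
  rw [hset, Nat.card_Ico]

theorem row_eq_zero_case {d : List Int} (hs : d.Pairwise (· ≤ ·)) {l : Nat}
    (hl : l < d.length) (hd : d.getD l 0 = 0) :
    ((d.length : Int) - (PySem.List.bisectLeft d 1 : Int)) = (rowCnt d l (d.length - 1) : Int) := by
  obtain ⟨hle, hlt, hge⟩ := PySem.List.bisectLeft_spec d 1 hs
  rw [rowCnt_eq_sub (lo := PySem.List.bisectLeft d 1) ?_]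
  · rw [Nat.cast_sub hle]
  · intro b hb
    rw [List.getD_eq_getElem d 0 hb]
    constructor
    · rintro ⟨-, h3⟩
      by_contra hc
      have := hlt b hb (by omega)
      omega
    · intro h1
      have h2 := hge b hb h1
      refine ⟨?_, by omega⟩
      by_contra hc
      have := sorted_getD_le hs (a := b) (b := l) (by omega) hl
      rw [List.getD_eq_getElem d 0 hb] at this
      omega

theorem row_eq_neg_case {d : List Int} (hs : d.Pairwise (· ≤ ·)) {l : Nat}
    (hl : l < d.length) (hd : d.getD l 0 < 0) :
    ((d.length : Int) - (PySem.List.bisectLeft d (-(d.getD l 0) + 1) : Int))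
      = (rowCnt d l (d.length - 1) : Int) := by
  obtain ⟨hle, hlt, hge⟩ := PySem.List.bisectLeft_spec d (-(d.getD l 0) + 1) hs
  rw [rowCnt_eq_sub (lo := PySem.List.bisectLeft d (-(d.getD l 0) + 1)) ?_]
  · rw [Nat.cast_sub hle]
  · intro b hb
    rw [List.getD_eq_getElem d 0 hb]
    constructor
    · rintro ⟨-, h3⟩
      by_contra hc
      have := hlt b hb (by omega)
      omega
    · intro h1
      have h2 := hge b hb h1
      refine ⟨?_, by omega⟩
      by_contra hc
      have := sorted_getD_le hs (a := b) (b := l) (by omega) hl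
      rw [List.getD_eq_getElem d 0 hb] at this
      omega

theorem row_eq_pos_case {d : List Int} (hs : d.Pairwise (· ≤ ·)) {l : Nat}
    (hl : l < d.length) (hd : 0 < d.getD l 0) :
    ((d.length : Int) - (l : Int) - 1) = (rowCnt d l (d.length - 1) : Int) := by
  rw [rowCnt_eq_sub (lo := l + 1) ?_]
  · rw [Nat.cast_sub (by omega : l + 1 ≤ d.length)]
    push_cast
    ring
  · intro b hb
    constructor
    · rintro ⟨h1, -⟩; omega
    · intro h1
      refine ⟨by omega, ?_⟩
      have := sorted_getD_le hs (a := l) (b := b) (by omega) hb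
      omega

theorem solveA_eq_pc {d : List Int} (hs : d.Pairwise (· ≤ ·)) :
    (List.range d.length).foldl
      (fun res (l : Nat) =>
        let dl := PySem.List.pyGetD d (l : Int) 0
        if dl = 0 then res + ((d.length : Int) - (PySem.List.bisectLeft d 1 : Int))
        else if dl < 0 then res + ((d.length : Int) - (PySem.List.bisectLeft d (-dl + 1) : Int))
        else res + ((d.length : Int) - (l : Int) - 1))
      0 = (pc d 0 (d.length - 1) : Int) := by
  have hbody : (List.range d.length).foldl
      (fun res (l : Nat) =>
        let dl := PySem.List.pyGetD d (l : Int) 0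
        if dl = 0 then res + ((d.length : Int) - (PySem.List.bisectLeft d 1 : Int))
        else if dl < 0 then res + ((d.length : Int) - (PySem.List.bisectLeft d (-dl + 1) : Int))
        else res + ((d.length : Int) - (l : Int) - 1))
      0 = (List.range d.length).foldl
      (fun res (l : Nat) => res +
        (if d.getD l 0 = 0 then ((d.length : Int) - (PySem.List.bisectLeft d 1 : Int))
        else if d.getD l 0 < 0 then ((d.length : Int) - (PySem.List.bisectLeft d (-(d.getD l 0) + 1) : Int))
        else ((d.length : Int) - (l : Int) - 1)))
      0 := by
    congr 1
    funext res l
    simp only [PySem.List.pyGetD_natCast]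
    split_ifs <;> rfl
  rw [hbody, PySem.List.foldl_add]
  rw [List.map_congr_left (g := fun l => (rowCnt d l (d.length - 1) : Int)) ?hpt]
  case hpt =>
    intro l hl
    rw [List.mem_range] at hl
    split_ifs with h1 h2
    · exact row_eq_zero_case hs hl h1
    · exact row_eq_neg_case hs hl h2
    · exact row_eq_pos_case hs hl (by omega)
  have hsum : ((List.range d.length).map (fun l => (rowCnt d l (d.length - 1) : Int))).sum
      = ∑ l ∈ Finset.range d.length, (rowCnt d l (d.length - 1) : Int) := by
    rfl
  rw [hsum]
  unfold pc
  rw [← Finset.range_eq_Ico]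
  push_cast
  rw [zero_add]

-- ===== VERDICT (by name: the statement is the Claim_ definition above) =====
theorem solve_spec : Claim_equal_solve := by
  intro profit cost _ _
  unfold Spec_solve solve solve_alt
  have hs : (PySem.List.sorted (pvDiff profit cost) (fun x => x)).Pairwise (· ≤ ·) := by
    simpa using PySem.List.sorted_pairwise (pvDiff profit cost) (fun x => x)
  have hlen : (PySem.List.sorted (pvDiff profit cost) (fun x => x)).length = profit.length := by
    rw [PySem.List.length_sorted]; simp [pvDiff]
  rw [twoPtrLoop_eq_pc hs 0 (profit.length - 1) 0 (fun h => by omega)]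
  rw [← hlen]
  rw [solveA_eq_pc hs]
  simp
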